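-- pv_equiv track=rewrite | github.com/nair12parvathi/Computational-Problem-Solving | Medieval-Trader/trader.py | totalProfit
-- ===== SOURCE A (Python) =====
-- def totalProfit(name,sortlist, max):
--     """
--     This method computes the maximum profit that can be gained considering the
--     maximum number of items to be bought
--     precondition: The name has the name of the city, sortlist has the details
--     in a sorted manner according to the price
--     difference, max has the maxium number of itmes that can be bought from a
--     city. Result will have the final string or message to be displayed,
--     tp(total profit) is initialised to 0
--     postcondition: Variable result has the final message to be displayed and
--     tp has the total profit calculated
--     :param name: name of the city
--     :param sortlist: sorted list which contains details which will help
--     compute the maximum profit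
--     :param max: the maximum number of items that can be bought from one
--     city and sold in another
--     :return: result which is the message to be displayed and tp is the
--     total profit computed
--     """
--     result= "go to "+ name+" and buy"
--     tp=0
--     for i in range(len(sortlist)):
--         if  sortlist[i][1][2]>0 :
--             if sortlist[i][1][0]<=max:
--                 max= max-sortlist[i][1][0]
--                 t=(sortlist[i][1][2] * sortlist[i][1][0])
--                 result= result+"\n"+str(sortlist[i][1][0])+ " "+str(sortlist[i][0])+" for profit of "+str(t)
--                 tp= tp+t
--             else:
--                 t=(sortlist[i][1][2]*max)
--                 result = result+"\n"+ str(max)+" "+str(sortlist[i][0])+" for profit of "+str(t)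
--                 tp=tp+t
--                 max=0
--         if max==0:
--             break
--     if tp==0:
--          result= result+ "\nno profit"
--     return result,tp
-- ===== SOURCE B (Python) =====
-- def _sell(items, budget):
--     # Recursively decide the sales; returns (message lines, total profit) for this suffix.
--     if not items:
--         return "", 0
--     item, det = items[0]
--     if det[2] > 0:
--         qty = min(det[0], budget)           # partial buy when the budget falls short
--         left = max(budget - det[0], 0)
--         p = det[2] * qty
--         line = "\n%d %s for profit of %d" % (qty, item, p)
--         if left == 0:
--             return line, p                   # budget exhausted: trading stops here
--         tail, tp = _sell(items[1:], left)
--         return line + tail, p + tp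
--     if budget == 0:
--         return "", 0                         # nothing left to spend: stop scanning
--     return _sell(items[1:], budget)
--
--
-- def totalProfit(name, sortlist, max):
--     lines, tp = _sell(sortlist, max)
--     result = "go to " + name + " and buy" + lines
--     if tp == 0:
--         result = result + "\nno profit"
--     return result, tp
-- ===== Notes on version B (the rewrite author's own statement) =====
-- stated objective: alternative
-- what changed: B is a direct recursion on the item list that returns each suffix's (lines, profit) pair and builds the message tail-first on the way back up, computing quantities with min/max arithmetic (qty = min(cost, budget), left = max(budget - cost, 0)) in place of A's imperative loop that threads the growing string, running total and remaining budget through mutable accumulators and two purchase branches.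
import Mathlib
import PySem

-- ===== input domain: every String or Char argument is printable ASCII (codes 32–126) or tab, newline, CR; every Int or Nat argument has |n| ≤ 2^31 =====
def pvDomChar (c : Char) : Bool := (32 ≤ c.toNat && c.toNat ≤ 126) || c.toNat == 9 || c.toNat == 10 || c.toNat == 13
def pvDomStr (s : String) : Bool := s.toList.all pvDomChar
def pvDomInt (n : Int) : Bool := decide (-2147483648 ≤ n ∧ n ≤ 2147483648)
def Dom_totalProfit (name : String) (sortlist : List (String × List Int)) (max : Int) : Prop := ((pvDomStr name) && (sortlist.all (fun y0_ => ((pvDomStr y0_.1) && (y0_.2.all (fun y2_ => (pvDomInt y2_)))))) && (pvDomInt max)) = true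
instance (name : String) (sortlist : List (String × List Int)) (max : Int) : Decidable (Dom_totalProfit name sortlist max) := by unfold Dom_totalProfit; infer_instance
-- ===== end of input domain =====

-- B replaces A's accumulator loop by a direct recursion that builds the message tail-first,
-- computing each quantity with min/max arithmetic instead of A's two purchase branches
-- (objective: alternative decomposition; return values proved equal on Pre_).

-- ===== PORT A =====
-- det[i] of A; Pre_ guarantees the index is in range, the default is never used there.
def pvG (l : List Int) (i : Int) : Int := (PySem.List.pyGet? l i).getD 0

-- A's for-loop over range(len(sortlist)) with state (result, tp, max) and the end-of-body break.
def totalProfitLoopA : List (String × List Int) → String → Int → Int → String × Int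
  | [], result, tp, _ => (result, tp)
  | (nm, det) :: rest, result, tp, mx =>
    if pvG det 2 > 0 then
      if pvG det 0 ≤ mx then
        let mx' := mx - pvG det 0
        let t := pvG det 2 * pvG det 0
        let result' := result ++ "\n" ++ PySem.Int.toStr (pvG det 0) ++ " " ++ nm ++ " for profit of " ++ PySem.Int.toStr t
        let tp' := tp + t
        if mx' = 0 then (result', tp') else totalProfitLoopA rest result' tp' mx'
      else
        let t := pvG det 2 * mx
        (result ++ "\n" ++ PySem.Int.toStr mx ++ " " ++ nm ++ " for profit of " ++ PySem.Int.toStr t, tp + t)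
    else
      if mx = 0 then (result, tp) else totalProfitLoopA rest result tp mx

def totalProfit (name : String) (sortlist : List (String × List Int)) (max : Int) : String × Int :=
  let r := totalProfitLoopA sortlist ("go to " ++ name ++ " and buy") 0 max
  if r.2 = 0 then (r.1 ++ "\nno profit", r.2) else r

-- ===== PORT B =====
-- B's _sell: recursion on the item list, returning (lines, profit) of the whole suffix.
def pvSell : List (String × List Int) → Int → String × Int
  | [], _ => ("", 0)
  | (item, det) :: rest, budget =>
    if pvG det 2 > 0 then
      let qty := Min.min (pvG det 0) budget
      let left := Max.max (budget - pvG det 0) 0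
      let p := pvG det 2 * qty
      let line := "\n" ++ PySem.Int.toStr qty ++ " " ++ item ++ " for profit of " ++ PySem.Int.toStr p
      if left = 0 then (line, p)
      else
        let r := pvSell rest left
        (line ++ r.1, p + r.2)
    else if budget = 0 then ("", 0)
    else pvSell rest budget

def totalProfit_alt (name : String) (sortlist : List (String × List Int)) (max : Int) : String × Int :=
  let r := pvSell sortlist max
  let result := "go to " ++ name ++ " and buy" ++ r.1
  if r.2 = 0 then (result ++ "\nno profit", r.2) else (result, r.2)

-- ===== PRECONDITION & SPEC =====
-- Pre_ excludes inputs where some item's detail list has fewer than 3 entries: Python A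
-- indexes det[2]/det[0] and raises IndexError there (except when an early break happens
-- to stop before the short entry, in which case both programs agree anyway).
def Pre_totalProfit (name : String) (sortlist : List (String × List Int)) (max : Int) : Prop :=
  ∀ p ∈ sortlist, 3 ≤ p.2.length
instance (name : String) (sortlist : List (String × List Int)) (max : Int) : Decidable (Pre_totalProfit name sortlist max) := by unfold Pre_totalProfit; infer_instance

def pvWitness_totalProfit : String × (List (String × List Int)) × Int :=
  ("york", [("apple", [2, 5, 3]), ("silk", [1, 9, -2])], 10)

def Spec_totalProfit (name : String) (sortlist : List (String × List Int)) (max : Int) (out : String × Int) : Prop := out = totalProfit_alt name sortlist max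
instance (name : String) (sortlist : List (String × List Int)) (max : Int) (out : String × Int) : Decidable (Spec_totalProfit name sortlist max out) := by unfold Spec_totalProfit; infer_instance

-- ===== CLAIM (what is proved, stated in full; the proofs are below) =====
def Claim_equal_totalProfit : Prop := ∀ (name : String) (sortlist : List (String × List Int)) (max : Int), Dom_totalProfit name sortlist max → Pre_totalProfit name sortlist max → Spec_totalProfit name sortlist max (totalProfit name sortlist max)

-- ===== LEMMAS AND PROOFS =====

-- A's loop equals: seed string ++ B's recursive suffix rendering, seed tp + its profit.
theorem loopA_eq_sell (l : List (String × List Int)) :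
    ∀ (result : String) (tp mx : Int),
      totalProfitLoopA l result tp mx =
        (result ++ (pvSell l mx).1, tp + (pvSell l mx).2) := by
  induction l with
  | nil => intro result tp mx; simp [totalProfitLoopA, pvSell]
  | cons hd rest ih =>
    intro result tp mx
    obtain ⟨nm, det⟩ := hd
    by_cases h1 : pvG det 2 > 0
    · by_cases h2 : pvG det 0 ≤ mx
      · -- profit > 0, cost ≤ budget: qty = cost, left = budget - cost
        have hq : Min.min (pvG det 0) mx = pvG det 0 := min_eq_left h2
        have hl : Max.max (mx - pvG det 0) 0 = mx - pvG det 0 := max_eq_left (by omega)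
        by_cases h0 : mx - pvG det 0 = 0
        · simp only [totalProfitLoopA, pvSell, if_pos h1, if_pos h2, hq, hl, if_pos h0]
          simp [String.append_assoc]
        · simp only [totalProfitLoopA, pvSell, if_pos h1, if_pos h2, hq, hl, if_neg h0, ih]
          simp [String.append_assoc, add_assoc]
      · -- profit > 0, cost > budget: qty = budget, left = 0, stop
        have hq : Min.min (pvG det 0) mx = mx := min_eq_right (by omega)
        have hl : Max.max (mx - pvG det 0) 0 = 0 := max_eq_right (by omega)
        simp only [totalProfitLoopA, pvSell, if_pos h1, if_neg h2, hq, hl, if_pos rfl]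
        simp [String.append_assoc]
    · -- profit ≤ 0: skip the item; stop if the budget is 0
      by_cases h0 : mx = 0
      · simp only [totalProfitLoopA, pvSell, if_neg h1, if_pos h0]
        simp
      · simp only [totalProfitLoopA, pvSell, if_neg h1, if_neg h0, ih]

-- ===== VERDICT (by name: the statement is the Claim_ definition above) =====
theorem totalProfit_spec : Claim_equal_totalProfit := by
  intro name sortlist mx _ _
  unfold Spec_totalProfit totalProfit totalProfit_alt
  rw [loopA_eq_sell]
  simp
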